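-- pv_equiv track=rewrite | github.com/euribates/advent_of_code_2018 | 02/part_02.py | find_one_diff
-- ===== SOURCE A (Python) =====
-- def find_one_diff(seq_a, seq_b):
--     bit_match = [
--         a == b
--         for a,b in zip(seq_a, seq_b)
--         ]
--     if sum([0 if bit else 1 for bit in bit_match]) == 1:
--         return True, bit_match.index(False)
--     return False, -1
-- ===== SOURCE B (Python) =====
-- def find_one_diff(seq_a, seq_b):
--     # Locate the first position where the sequences diverge, then accept iff
--     # the remaining slices (up to the common length) are identical.
--     n = min(len(seq_a), len(seq_b))
--     i = 0
--     while i < n and seq_a[i] == seq_b[i]: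
--         i += 1
--     if i < n and seq_a[i+1:n] == seq_b[i+1:n]:
--         return True, i
--     return False, -1
-- ===== Notes on version B (the rewrite author's own statement) =====
-- stated objective: alternative
-- what changed: Instead of A's mismatch counting (build a match list, sum a 0/1 list, list.index the first False), B locates the first divergence point with a while loop and then decides by a single slice equality test on the remaining tails up to the common length - no counting, no intermediate lists.
import Mathlib
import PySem

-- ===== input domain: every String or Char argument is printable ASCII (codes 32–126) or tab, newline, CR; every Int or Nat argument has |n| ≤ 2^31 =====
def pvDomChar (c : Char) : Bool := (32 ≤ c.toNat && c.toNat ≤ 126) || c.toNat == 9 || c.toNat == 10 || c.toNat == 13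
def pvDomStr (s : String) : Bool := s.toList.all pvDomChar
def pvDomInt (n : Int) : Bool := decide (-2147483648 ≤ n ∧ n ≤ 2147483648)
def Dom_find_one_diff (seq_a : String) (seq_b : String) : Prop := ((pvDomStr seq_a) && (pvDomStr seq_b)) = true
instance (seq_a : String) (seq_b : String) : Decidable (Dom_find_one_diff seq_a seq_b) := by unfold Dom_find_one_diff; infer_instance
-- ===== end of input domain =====

-- B replaces A's mismatch counting (match list, 0/1 sum, list.index) by finding the first
-- divergence point and then testing the remaining tails for equality (objective: alternative).

-- ===== PORT A =====
def find_one_diff (seq_a : String) (seq_b : String) : Bool × Int :=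
  let bit_match := (seq_a.toList.zip seq_b.toList).map (fun p => p.1 == p.2)
  if (bit_match.map (fun bit => if bit then (0 : Int) else 1)).sum == 1 then
    (true,
      match PySem.List.index? bit_match false with
      | some k => (k : Int)
      | none => 0)  -- unreachable: the sum being 1 guarantees a False in bit_match
  else (false, -1)

-- ===== PORT B =====
-- seq_a[i+1:n] == seq_b[i+1:n] of Source B (n = min of the lengths): at the mismatch the
-- unread tails are `as`/`bs`, and the two slices are exactly those tails truncated to
-- their common length.
def pvTailsEq (as bs : List Char) : Bool :=
  as.take (min as.length bs.length) == bs.take (min as.length bs.length)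

-- the while loop of Source B: advance while i < n and seq_a[i] == seq_b[i]
def fodScan : List Char → List Char → Int → Bool × Int
  | a :: as, b :: bs, i =>
    if a == b then fodScan as bs (i + 1)
    else if pvTailsEq as bs then (true, i) else (false, -1)
  | _, _, _ => (false, -1)  -- i == n: the sequences agree on their whole common length

def find_one_diff_alt (seq_a : String) (seq_b : String) : Bool × Int :=
  fodScan seq_a.toList seq_b.toList 0

-- ===== PRECONDITION & SPEC =====
def Spec_find_one_diff (seq_a : String) (seq_b : String) (out : Bool × Int) : Prop := out = find_one_diff_alt seq_a seq_b
instance (seq_a : String) (seq_b : String) (out : Bool × Int) : Decidable (Spec_find_one_diff seq_a seq_b out) := by unfold Spec_find_one_diff; infer_instance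

-- ===== CLAIM (what is proved, stated in full; the proofs are below) =====
def Claim_equal_find_one_diff : Prop := ∀ (seq_a : String) (seq_b : String), Dom_find_one_diff seq_a seq_b → Spec_find_one_diff seq_a seq_b (find_one_diff seq_a seq_b)

-- ===== LEMMAS AND PROOFS =====

-- A's 0/1 sum is a mismatch count over the zipped pairs
theorem sum_eq_cnt (ps : List (Char × Char)) :
    ((ps.map (fun p => p.1 == p.2)).map (fun bit => if bit then (0 : Int) else 1)).sum
      = (ps.countP (fun p => !(p.1 == p.2)) : Int) := by
  have h : (fun (b : Bool) => if b then (0 : Int) else 1)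
      = (fun b => if (!b) = true then 1 else 0) := by
    funext b; cases b <;> simp
  rw [h, PySem.List.sum_map_ite_one_zero (fun b => !b)]
  rw [List.countP_map]
  rfl

-- the tails-equal test says exactly "no mismatch among the zipped tails"
theorem tailsEq_iff (as : List Char) : ∀ bs : List Char,
    pvTailsEq as bs = ((as.zip bs).countP (fun p => !(p.1 == p.2)) == 0) := by
  induction as with
  | nil => intro bs; simp [pvTailsEq]
  | cons a as ih =>
    intro bs
    cases bs with
    | nil => simp [pvTailsEq]
    | cons b bs =>
      by_cases h : a = b
      · subst h
        simpa [pvTailsEq, Nat.succ_min_succ, List.countP_cons] using ih bs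
      · simp [pvTailsEq, h]

-- the scan loop, characterised by A's "mismatch count = 1, index of first False" reading
theorem fodScan_spec (as : List Char) : ∀ (bs : List Char) (i : Int),
    fodScan as bs i
      = if (as.zip bs).countP (fun p => !(p.1 == p.2)) = 1 then
          (true, i + (match PySem.List.index? ((as.zip bs).map (fun p => p.1 == p.2)) false with
                      | some k => (k : Int)
                      | none => 0))
        else (false, -1) := by
  induction as with
  | nil => intro bs i; simp [fodScan]
  | cons a as ih =>
    intro bs i
    cases bs with
    | nil => simp [fodScan]
    | cons b bs =>
      by_cases h : a = b
      · subst h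
        have hstep : fodScan (a :: as) (a :: bs) i = fodScan as bs (i + 1) := by
          simp [fodScan]
        rw [hstep, ih]
        have hidx : PySem.List.index? (((a, a) :: as.zip bs).map (fun p => p.1 == p.2)) false
            = Option.map (fun x => x + 1) (PySem.List.index? ((as.zip bs).map (fun p => p.1 == p.2)) false) := by
          simp only [List.map_cons, beq_self_eq_true]
          exact PySem.List.index?_cons_of_ne _ (by simp)
        rcases hrec : PySem.List.index? ((as.zip bs).map (fun p => p.1 == p.2)) false with _ | k
        · -- no False downstream: no mismatch in the tails, so neither count is 1
          have h0 : (as.zip bs).countP (fun p => !(p.1 == p.2)) = 0 := by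
            rw [PySem.List.index?_eq_none_iff] at hrec
            rw [List.countP_eq_zero]
            intro q hq
            by_contra hne
            exact hrec (by
              simp only [List.mem_map]
              exact ⟨q, hq, by simpa using hne⟩)
          simp [h0]
        · rw [List.zip_cons_cons, hidx, hrec]
          by_cases hc : (as.zip bs).countP (fun p => !(p.1 == p.2)) = 1
          · simp only [List.countP_cons, hc]
            have harith : i + 1 + (k : Int) = i + ((k : Int) + 1) := by ring
            simp [harith]
          · simp [hc]
      · -- first divergence here at index i: decide by the tails-equal test
        have hstep : fodScan (a :: as) (b :: bs) i
            = if pvTailsEq as bs then (true, i) else (false, -1) := by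
          simp [fodScan, h]
        rw [hstep, tailsEq_iff]
        have hidx : PySem.List.index? (((a, b) :: as.zip bs).map (fun p => p.1 == p.2)) false = some 0 := by
          have hb : (a == b) = false := by simp [h]
          simp only [List.map_cons, hb]
          exact PySem.List.index?_cons_self _ _
        rw [List.zip_cons_cons, hidx]
        have hone : (if (!(a == b)) = true then (1:Nat) else 0) = 1 := by simp [h]
        simp only [List.countP_cons, hone]
        by_cases hc : (as.zip bs).countP (fun p => !(p.1 == p.2)) = 0
        · simp [hc]
        · simp [hc]

-- ===== VERDICT (by name: the statement is the Claim_ definition above) =====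
theorem find_one_diff_spec : Claim_equal_find_one_diff := by
  intro seq_a seq_b _
  simp only [Spec_find_one_diff, find_one_diff, find_one_diff_alt]
  rw [fodScan_spec, sum_eq_cnt]
  by_cases hc : (seq_a.toList.zip seq_b.toList).countP (fun p => !(p.1 == p.2)) = 1 <;>
    simp [hc]
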